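-- pv_equiv track=rewrite | github.com/xiaoruiDong/ml_scripts | src/utils.py | get_hparams_combinations
-- ===== SOURCE A (Python) =====
-- import itertools
-- from typing import Sequence, Iterable
--
-- def get_hparams_combinations(
--     model_hparams_grid: dict[str, Sequence],
--     train_hparams_grid: dict[str, Sequence],
-- ) -> Iterable:
--     """
--     Get all combinations of hyperparameters.
--
--     Args:
--         model_hparams_grid (dict[str, Sequence]): Grid of model hyperparameters.
--         train_hparams_grid (dict[str, Sequence]): Grid of training hyperparameters.
--
--     Yields:
--         tuple: Model hyperparameters and training hyperparameters.
--     """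
--     if not train_hparams_grid and not model_hparams_grid:
--         yield {}, {}
--
--     elif not train_hparams_grid:
--         model_keys, model_vals = zip(*model_hparams_grid.items())
--         for model_combine in itertools.product(*model_vals):
--             model_dict = dict(zip(model_keys, model_combine))
--             yield model_dict, {}
--
--     elif not model_hparams_grid:
--         train_keys, train_vals = zip(*train_hparams_grid.items())
--         for train_combine in itertools.product(*train_vals):
--             train_dict = dict(zip(train_keys, train_combine))
--             yield {}, train_dict
--
--     else:
--         train_keys, train_vals = zip(*train_hparams_grid.items())
--         model_keys, model_vals = zip(*model_hparams_grid.items())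
--
--         for train_combine in itertools.product(*train_vals):
--             train_dict = dict(zip(train_keys, train_combine))
--
--             for model_combine in itertools.product(*model_vals):
--                 model_dict = dict(zip(model_keys, model_combine))
--
--                 yield model_dict, train_dict
-- ===== SOURCE B (Python) =====
-- import itertools
--
--
-- def get_hparams_combinations(model_hparams_grid, train_hparams_grid):
--     # One flat product over both grids (train values first, so train varies
--     # slowest like A's outer loop); each combined tuple is sliced back into
--     # the two dicts.  No case analysis: product() of zero iterables yields
--     # one empty tuple, which covers the empty-grid cases.
--     keys = list(train_hparams_grid.keys()) + list(model_hparams_grid.keys())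
--     vals = list(train_hparams_grid.values()) + list(model_hparams_grid.values())
--     n = len(train_hparams_grid)
--     for combo in itertools.product(*vals):
--         yield dict(zip(keys[n:], combo[n:])), dict(zip(keys[:n], combo[:n]))
-- ===== Notes on version B (the rewrite author's own statement) =====
-- stated objective: simpler
-- what changed: Replaces A's four-way empty/non-empty case split with nested loops by a single itertools.product over the concatenated train+model value lists, slicing each combined tuple back into the two dicts (product() of zero iterables yields one empty tuple, so no special cases are needed).
import Mathlib
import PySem

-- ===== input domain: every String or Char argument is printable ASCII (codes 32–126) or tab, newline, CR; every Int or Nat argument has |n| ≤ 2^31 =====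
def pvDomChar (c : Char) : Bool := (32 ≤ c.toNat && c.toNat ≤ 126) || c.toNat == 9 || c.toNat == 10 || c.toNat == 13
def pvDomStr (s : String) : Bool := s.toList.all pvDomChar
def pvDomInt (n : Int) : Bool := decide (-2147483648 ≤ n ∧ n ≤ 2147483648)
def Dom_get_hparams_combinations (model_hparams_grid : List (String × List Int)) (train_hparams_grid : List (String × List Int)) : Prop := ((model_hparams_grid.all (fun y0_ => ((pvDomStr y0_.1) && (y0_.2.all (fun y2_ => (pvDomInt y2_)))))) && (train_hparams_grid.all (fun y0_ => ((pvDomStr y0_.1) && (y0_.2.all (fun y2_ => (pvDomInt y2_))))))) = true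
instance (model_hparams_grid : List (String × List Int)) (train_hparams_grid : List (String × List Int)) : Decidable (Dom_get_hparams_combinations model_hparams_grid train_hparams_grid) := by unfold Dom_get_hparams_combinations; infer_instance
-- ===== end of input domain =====

-- B replaces A's four-way case split with one flat itertools.product over both
-- grids' value lists (train first) sliced back into the two dicts (objective:
-- simpler).  Both generators are fully consumed into a list of pairs here.

-- itertools.product(*vals): leftmost iterable varies slowest (shared helper:
-- both Pythons call itertools.product).
def pyProduct : List (List Int) → List (List Int)
  | [] => [[]]
  | v :: vs => v.flatMap (fun x => (pyProduct vs).map (fun c => x :: c))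

-- ===== PORT A =====
def get_hparams_combinations (model_hparams_grid : List (String × List Int)) (train_hparams_grid : List (String × List Int)) : List ((List (String × Int)) × (List (String × Int))) :=
  if train_hparams_grid = [] ∧ model_hparams_grid = [] then
    [([], [])]
  else if train_hparams_grid = [] then
    -- dict(zip(model_keys, model_combine)): keys of a Python dict are distinct,
    -- so the resulting dict is exactly the zipped association list
    (pyProduct (model_hparams_grid.map Prod.snd)).map
      (fun mc => ((model_hparams_grid.map Prod.fst).zip mc, []))
  else if model_hparams_grid = [] then
    (pyProduct (train_hparams_grid.map Prod.snd)).map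
      (fun tc => ([], (train_hparams_grid.map Prod.fst).zip tc))
  else
    (pyProduct (train_hparams_grid.map Prod.snd)).flatMap
      (fun tc =>
        (pyProduct (model_hparams_grid.map Prod.snd)).map
          (fun mc => ((model_hparams_grid.map Prod.fst).zip mc,
                      (train_hparams_grid.map Prod.fst).zip tc)))

-- ===== PORT B =====
def get_hparams_combinations_alt (model_hparams_grid : List (String × List Int)) (train_hparams_grid : List (String × List Int)) : List ((List (String × Int)) × (List (String × Int))) :=
  let keys := train_hparams_grid.map Prod.fst ++ model_hparams_grid.map Prod.fst
  let vals := train_hparams_grid.map Prod.snd ++ model_hparams_grid.map Prod.snd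
  let n : Int := (train_hparams_grid.length : Int)
  (pyProduct vals).map (fun combo =>
    ((PySem.List.slice keys (some n) none).zip (PySem.List.slice combo (some n) none),
     (PySem.List.slice keys none (some n)).zip (PySem.List.slice combo none (some n))))

-- ===== PRECONDITION & SPEC =====
def Spec_get_hparams_combinations (model_hparams_grid : List (String × List Int)) (train_hparams_grid : List (String × List Int)) (out : List ((List (String × Int)) × (List (String × Int)))) : Prop := out = get_hparams_combinations_alt model_hparams_grid train_hparams_grid
instance (model_hparams_grid : List (String × List Int)) (train_hparams_grid : List (String × List Int)) (out : List ((List (String × Int)) × (List (String × Int)))) : Decidable (Spec_get_hparams_combinations model_hparams_grid train_hparams_grid out) := by unfold Spec_get_hparams_combinations; infer_instance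

-- ===== CLAIM (what is proved, stated in full; the proofs are below) =====
def Claim_equal_get_hparams_combinations : Prop := ∀ (model_hparams_grid : List (String × List Int)) (train_hparams_grid : List (String × List Int)), Dom_get_hparams_combinations model_hparams_grid train_hparams_grid → Spec_get_hparams_combinations model_hparams_grid train_hparams_grid (get_hparams_combinations model_hparams_grid train_hparams_grid)

-- ===== LEMMAS AND PROOFS =====

-- every tuple produced by product(*vs) has one entry per iterable
theorem length_of_mem_pyProduct {vs : List (List Int)} {c : List Int}
    (h : c ∈ pyProduct vs) : c.length = vs.length := by
  induction vs generalizing c with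
  | nil => simp [pyProduct] at h; simp [h]
  | cons v vs ih =>
    simp [pyProduct] at h
    obtain ⟨x, _, c', hc', rfl⟩ := h
    simp [ih hc']

-- product over concatenated iterables = nested product
theorem pyProduct_append (ts ms : List (List Int)) :
    pyProduct (ts ++ ms) =
      (pyProduct ts).flatMap (fun a => (pyProduct ms).map (fun b => a ++ b)) := by
  induction ts with
  | nil => simp [pyProduct]
  | cons v ts ih =>
    simp [pyProduct, ih, List.flatMap_map, List.map_flatMap,
          List.flatMap_assoc, Function.comp_def]

-- B's flat sliced product, rewritten as A's nested shape
theorem alt_eq_nested (m t : List (String × List Int)) :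
    get_hparams_combinations_alt m t =
      (pyProduct (t.map Prod.snd)).flatMap
        (fun tc =>
          (pyProduct (m.map Prod.snd)).map
            (fun mc => ((m.map Prod.fst).zip mc, (t.map Prod.fst).zip tc))) := by
  simp only [get_hparams_combinations_alt]
  rw [pyProduct_append]
  simp only [List.map_flatMap, List.map_map]
  refine List.flatMap_congr ?_
  intro tc htc
  refine List.map_congr_left ?_
  intro mc hmc
  have hlt : tc.length = t.length := by
    simpa using length_of_mem_pyProduct htc
  have hk : (t.map Prod.fst).length = t.length := by simp
  simp only [Function.comp_apply, PySem.List.slice_to_natCast,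
    PySem.List.slice_from_natCast]
  rw [← hk, List.drop_left, List.take_left, hk, ← hlt, List.drop_left,
    List.take_left]

-- ===== VERDICT (by name: the statement is the Claim_ definition above) =====
theorem get_hparams_combinations_spec : Claim_equal_get_hparams_combinations := by
  intro m t _
  unfold Spec_get_hparams_combinations
  rw [alt_eq_nested]
  unfold get_hparams_combinations
  by_cases ht : t = []
  · by_cases hm : m = []
    · simp [ht, hm, pyProduct]
    · simp [ht, hm, pyProduct]
  · by_cases hm : m = []
    · simp only [ht, hm, if_false, reduceIte, pyProduct, List.map_nil]
      exact List.map_eq_flatMap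

    · simp [ht, hm]
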